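-- pv_equiv track=rewrite | github.com/meelovar/TetrikaTasks | task02.py | count_titles
-- ===== SOURCE A (Python) =====
-- def count_titles(titles):
--     counts = {}
--
--     for t in titles:
--         key = t[0]
--
--         if key in counts:
--             counts[key] += 1
--         else:
--             counts[key] = 1
--
--     return counts
-- ===== SOURCE B (Python) =====
-- def count_titles(titles):
--     firsts = [t[0] for t in titles]
--     return {k: firsts.count(k) for k in dict.fromkeys(firsts)}
-- ===== Notes on version B (the rewrite author's own statement) =====
-- stated objective: simpler
-- what changed: Replaces the membership-test-and-increment dict loop by a two-phase comprehension: extract first characters, deduplicate them in first-occurrence order with dict.fromkeys, and map each key to firsts.count(k).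
import Mathlib
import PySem

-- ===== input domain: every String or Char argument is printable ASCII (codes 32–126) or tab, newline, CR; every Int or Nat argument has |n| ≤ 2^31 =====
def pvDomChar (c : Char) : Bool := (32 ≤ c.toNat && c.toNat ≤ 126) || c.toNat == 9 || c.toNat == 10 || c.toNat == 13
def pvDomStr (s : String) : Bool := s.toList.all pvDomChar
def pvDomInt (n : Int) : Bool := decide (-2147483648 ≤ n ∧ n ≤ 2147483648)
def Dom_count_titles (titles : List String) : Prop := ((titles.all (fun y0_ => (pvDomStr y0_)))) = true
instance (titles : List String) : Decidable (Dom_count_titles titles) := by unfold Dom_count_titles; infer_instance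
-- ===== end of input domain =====

-- B replaces A's membership-test-and-increment dict loop by first-char extraction + ordered dedup + count per key (objective: simpler).
-- A raises IndexError on an empty title (t[0]); B does too; such inputs are outside Pre_.

-- ===== PORT A =====
def count_titles (titles : List String) : List (String × Int) :=
  (titles.foldl (fun counts t =>
      match PySem.Str.pyGet? t 0 with
      | none => counts   -- t[0] raises IndexError: unreachable under Pre_
      | some c =>
        let key := String.ofList [c]
        if counts.contains key then counts.insert key (counts.getD key 0 + 1)
        else counts.insert key 1) PySem.Dict.empty).items

-- ===== PORT B =====
def count_titles_alt (titles : List String) : List (String × Int) :=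
  let firsts := titles.map (fun t =>
    match PySem.Str.pyGet? t 0 with
    | none => ""       -- t[0] raises IndexError: unreachable under Pre_
    | some c => String.ofList [c])
  (PySem.List.dedup firsts).map (fun k => (k, (firsts.count k : Int)))

-- ===== PRECONDITION & SPEC =====
-- Pre_ excludes lists containing an empty title, on which the Python A raises IndexError at t[0].
def Pre_count_titles (titles : List String) : Prop := ∀ t ∈ titles, t ≠ ""
instance (titles : List String) : Decidable (Pre_count_titles titles) := by unfold Pre_count_titles; infer_instance
def pvWitness_count_titles : List String := ["apple", "ant", "bee"]

def Spec_count_titles (titles : List String) (out : List (String × Int)) : Prop := out = count_titles_alt titles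
instance (titles : List String) (out : List (String × Int)) : Decidable (Spec_count_titles titles out) := by unfold Spec_count_titles; infer_instance

-- ===== CLAIM (what is proved, stated in full; the proofs are below) =====
def Claim_equal_count_titles : Prop := ∀ (titles : List String), Dom_count_titles titles → Pre_count_titles titles → Spec_count_titles titles (count_titles titles)

-- ===== LEMMAS AND PROOFS =====

-- first character of a nonempty string, as pyGet? gives it
theorem pyGet?_zero_of_ne_empty (t : String) (h : t ≠ "") :
    ∃ c, PySem.Str.pyGet? t 0 = some c := by
  have hne : t.toList ≠ [] := by
    intro hnil
    exact h (by cases t with | _ l => simp_all)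
  cases hl : t.toList with
  | nil => exact absurd hl hne
  | cons c cs =>
    exact ⟨c, by simp [PySem.Str.pyGet?, PySem.Chars.pyGet?, hl]⟩

theorem count_titles_spec' (titles : List String) (h : Pre_count_titles titles) :
    count_titles titles = count_titles_alt titles := by
  set f : String → String := fun t =>
    match PySem.Str.pyGet? t 0 with
    | none => ""
    | some c => String.ofList [c] with hf
  have hstep : count_titles titles = (PySem.Dict.counter (titles.map f)).items := by
    unfold count_titles
    congr 1
    rw [← PySem.Dict.foldl_insert_getD_add_one_eq_counter, List.foldl_map]
    apply PySem.List.foldl_congr_mem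
    intro acc t ht
    obtain ⟨c, hc⟩ := pyGet?_zero_of_ne_empty t (h t ht)
    simp only [hf, hc]
    by_cases hco : acc.contains (String.ofList [c])
    · simp [hco]
    · have : acc.getD (String.ofList [c]) 0 = 0 := by
        simp [PySem.Dict.getD_eq_get?_getD,
          (PySem.Dict.get?_eq_none_iff_contains acc (String.ofList [c])).2 (by simpa using hco)]
      simp [hco, this]
  rw [hstep, PySem.Dict.items_counter]
  simp [count_titles_alt, hf]

-- ===== VERDICT (by name: the statement is the Claim_ definition above) =====
theorem count_titles_spec : Claim_equal_count_titles := by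
  intro titles _ hpre
  exact count_titles_spec' titles hpre
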